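-- pv_equiv track=rewrite | github.com/levhyun/PythonDatabaseWorkbench | Server/Mapper.py | insertValueFormat
-- ===== SOURCE A (Python) =====
-- def insertValueFormat(value):
--     result = ""
--     temp = ""
--     cnt = 0
--     for i in range(0, len(value)):
--         if value[i] == ',':
--             result += f'\"{temp}\",'
--             cnt += 1
--             temp = ""
--         else:
--             temp += value[i]
--     result += f' \"{temp}\"'
--     return result
-- ===== SOURCE B (Python) =====
-- def insertValueFormat(value):
--     parts = value.split(',')
--     return ''.join(f'"{p}",' for p in parts[:-1]) + f' "{parts[-1]}"'
-- ===== Notes on version B (the rewrite author's own statement) =====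
-- stated objective: simpler
-- what changed: Replaced the character-by-character state machine (accumulating temp and flushing it at each separator) by splitting the string on the separator once and reassembling the quoted fields from the token list.
import Mathlib
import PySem

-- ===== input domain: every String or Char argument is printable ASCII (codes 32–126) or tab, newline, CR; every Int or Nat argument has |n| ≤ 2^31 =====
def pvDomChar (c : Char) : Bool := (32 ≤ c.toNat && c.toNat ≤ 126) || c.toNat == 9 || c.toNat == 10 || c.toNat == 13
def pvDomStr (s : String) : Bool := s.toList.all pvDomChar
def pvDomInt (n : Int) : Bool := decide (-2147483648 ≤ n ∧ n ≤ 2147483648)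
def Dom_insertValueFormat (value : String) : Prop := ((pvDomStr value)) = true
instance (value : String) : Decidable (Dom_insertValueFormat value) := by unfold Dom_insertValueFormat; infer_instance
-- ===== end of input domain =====

-- B splits the string on ',' once and reassembles the quoted fields from the token list,
-- replacing A's character-by-character comma state machine (objective: simpler).

-- ===== PORT A =====
-- A's char loop: state (result, temp, cnt); flush temp on each ','.
def insertValueFormat (value : String) : String :=
  let st := value.toList.foldl
    (fun (st : String × String × Int) c =>
      if c = ',' then (st.1 ++ "\"" ++ st.2.1 ++ "\",", "", st.2.2 + 1)
      else (st.1, st.2.1.push c, st.2.2))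
    ("", "", 0)
  st.1 ++ " \"" ++ st.2.1 ++ "\""

-- ===== PORT B =====
-- value.split(',') via PySem.Chars.splitOn; then join quoted non-final parts and append the final one.
def insertValueFormat_alt (value : String) : String :=
  let parts := PySem.Chars.splitOn value.toList [',']
  String.join (parts.dropLast.map (fun p => "\"" ++ String.ofList p ++ "\",")) ++
    " \"" ++ String.ofList (parts.getLastD []) ++ "\""

-- ===== PRECONDITION & SPEC =====
def Spec_insertValueFormat (value : String) (out : String) : Prop := out = insertValueFormat_alt value
instance (value : String) (out : String) : Decidable (Spec_insertValueFormat value out) := by unfold Spec_insertValueFormat; infer_instance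

-- ===== CLAIM (what is proved, stated in full; the proofs are below) =====
def Claim_equal_insertValueFormat : Prop := ∀ (value : String), Dom_insertValueFormat value → Spec_insertValueFormat value (insertValueFormat value)

-- ===== LEMMAS AND PROOFS =====

-- proof-side split on ',' (structural recursion, always nonempty)
def pvSplit : List Char → List (List Char)
  | [] => [[]]
  | c :: rest =>
    if c = ',' then [] :: pvSplit rest
    else match pvSplit rest with
      | p :: ps => (c :: p) :: ps
      | [] => [[c]]

theorem pvSplit_ne_nil (cs : List Char) : pvSplit cs ≠ [] := by
  cases cs with
  | nil => simp [pvSplit]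
  | cons c rest =>
    simp only [pvSplit]
    split
    · simp
    · cases h : pvSplit rest <;> simp

-- prepend to the first part
def pvConsHead (x : List Char) : List (List Char) → List (List Char)
  | [] => [x]
  | p :: ps => (x ++ p) :: ps

theorem pvConsHead_nil (ps : List (List Char)) (h : ps ≠ []) : pvConsHead [] ps = ps := by
  cases ps with
  | nil => exact absurd rfl h
  | cons p q => simp [pvConsHead]

theorem go_eq_pvSplit : ∀ (fuel : Nat) (l cur : List Char) (acc : List (List Char)),
    l.length < fuel →
    PySem.Chars.splitOn.go [','] fuel l cur acc = acc.reverse ++ pvConsHead cur.reverse (pvSplit l) := by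
  intro fuel
  induction fuel with
  | zero => intro l cur acc h; omega
  | succ n ih =>
    intro l cur acc h
    cases l with
    | nil =>
      simp [PySem.Chars.splitOn.go, pvSplit, pvConsHead]
    | cons c rest =>
      by_cases hc : c = ','
      · subst hc
        have hpre : List.isPrefixOf [','] (',' :: rest) = true := by
          simp [List.isPrefixOf]
        rw [PySem.Chars.splitOn.go]
        simp only [hpre, if_true, List.length_cons, List.length_nil, List.drop_succ_cons,
          List.drop_zero]
        rw [ih rest [] (cur.reverse :: acc) (by simp at h ⊢; omega)]
        simp only [List.reverse_nil]
        rw [pvConsHead_nil _ (pvSplit_ne_nil rest)]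
        have h1 : pvSplit (',' :: rest) = [] :: pvSplit rest := by simp [pvSplit]
        rw [h1]
        simp [pvConsHead]
      · have hpre : List.isPrefixOf [','] (c :: rest) = false := by
          simp [List.isPrefixOf]
          exact fun hh => (hc hh.symm).elim
        rw [PySem.Chars.splitOn.go]
        simp only [hpre, Bool.false_eq_true, if_false]
        rw [ih rest (c :: cur) acc (by simp at h ⊢; omega)]
        have hsp : pvSplit (c :: rest) =
            match pvSplit rest with
            | p :: ps => (c :: p) :: ps
            | [] => [[c]] := by
          simp [pvSplit, hc]
        rw [hsp]
        cases hr : pvSplit rest with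
        | nil => exact absurd hr (pvSplit_ne_nil rest)
        | cons p ps => simp [pvConsHead]

theorem splitOn_comma (cs : List Char) : PySem.Chars.splitOn cs [','] = pvSplit cs := by
  unfold PySem.Chars.splitOn
  rw [go_eq_pvSplit (cs.length + 1) cs [] [] (by omega)]
  simp [pvConsHead_nil _ (pvSplit_ne_nil cs)]

-- B's assembly, on lists of char-lists
def pvRender (parts : List (List Char)) : List Char :=
  ((parts.dropLast.map (fun p => '"' :: p ++ ['"', ','])).flatten) ++
    [' ', '"'] ++ parts.getLastD [] ++ ['"']

theorem join_toList (l : List String) (a : String) :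
    (l.foldl (· ++ ·) a).toList = a.toList ++ (l.map String.toList).flatten := by
  induction l generalizing a with
  | nil => simp
  | cons s rest ih => simp [List.foldl, ih]

theorem alt_toList (value : String) :
    (insertValueFormat_alt value).toList = pvRender (pvSplit value.toList) := by
  unfold insertValueFormat_alt pvRender
  rw [splitOn_comma]
  simp [String.join, join_toList, List.map_map, Function.comp_def]

-- A's loop, assembled, equals r ++ render of the split with temp prepended to the first part
theorem fold_eq_render : ∀ (cs : List Char) (r t : String) (cnt : Int),
    ((cs.foldl
        (fun (st : String × String × Int) c =>
          if c = ',' then (st.1 ++ "\"" ++ st.2.1 ++ "\",", "", st.2.2 + 1)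
          else (st.1, st.2.1.push c, st.2.2)) (r, t, cnt)).1 ++ " \"" ++
      (cs.foldl
        (fun (st : String × String × Int) c =>
          if c = ',' then (st.1 ++ "\"" ++ st.2.1 ++ "\",", "", st.2.2 + 1)
          else (st.1, st.2.1.push c, st.2.2)) (r, t, cnt)).2.1 ++ "\"").toList
    = r.toList ++ pvRender (pvConsHead t.toList (pvSplit cs)) := by
  intro cs
  induction cs with
  | nil =>
    intro r t cnt
    simp [pvRender, pvSplit, pvConsHead]
  | cons c rest ih =>
    intro r t cnt
    by_cases hc : c = ','
    · subst hc
      simp only [List.foldl_cons, reduceIte]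
      rw [ih]
      have h1 : pvSplit (',' :: rest) = [] :: pvSplit rest := by simp [pvSplit]
      rw [h1]
      cases hr : pvSplit rest with
      | nil => exact absurd hr (pvSplit_ne_nil rest)
      | cons p ps =>
        simp [pvRender, pvConsHead]
    · simp only [List.foldl_cons, if_neg hc]
      rw [ih]
      have h1 : pvSplit (c :: rest) =
          match pvSplit rest with
          | p :: ps => (c :: p) :: ps
          | [] => [[c]] := by simp [pvSplit, hc]
      rw [h1]
      cases hr : pvSplit rest with
      | nil => exact absurd hr (pvSplit_ne_nil rest)
      | cons p ps => simp [pvConsHead]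

-- ===== VERDICT (by name: the statement is the Claim_ definition above) =====
theorem insertValueFormat_spec : Claim_equal_insertValueFormat := by
  unfold Claim_equal_insertValueFormat
  intro value _
  unfold Spec_insertValueFormat
  apply String.toList_inj.mp
  rw [alt_toList]
  simp only [insertValueFormat]
  rw [fold_eq_render value.toList "" "" 0]
  simp [pvConsHead_nil _ (pvSplit_ne_nil value.toList)]
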